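-- pv_equiv track=rewrite | github.com/alexwxj457/myproject1 | sigal.py | light
-- ===== SOURCE A (Python) =====
-- def light(phase_list,phase_time_list):#设置信号灯
--     yellow_list=[x.replace('G','y') for x in phase_list]#将绿灯变为黄灯
--     light_list=[]
--     time_gap_list=[0]
--     time_list=[]
--     for i in range(len(yellow_list)):
--         light_list.append(phase_list[i])
--         light_list.append(yellow_list[i])#每个相位之后加入黄灯
--         time_gap_list.append(phase_time_list[i])
--         time_gap_list=time_gap_list+[3]#加入黄灯时间，得到个相位及黄灯的保持时间
--     for i in range(len(time_gap_list)):
--         x=(2*time_gap_list)[:i+1]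
--         time_list.append(sum(x))#叠加得到单个周期内各相位及黄灯开始时间
--
--     return light_list,time_list#输出相位和时间的组合
-- ===== SOURCE B (Python) =====
-- def light(phase_list, phase_time_list):
--     # one pass, running prefix sum; O(n) instead of A's O(n^2) slice-resumming
--     light_list = []
--     time_list = [0]
--     acc = 0
--     for p, t in zip(phase_list, phase_time_list):
--         light_list.append(p)
--         light_list.append(p.replace('G', 'y'))
--         acc += t
--         time_list.append(acc)
--         acc += 3
--         time_list.append(acc)
--     return light_list, time_list
-- ===== Notes on version B (the rewrite author's own statement) =====
-- stated objective: faster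
-- what changed: A rebuilds the gap list with repeated concatenation and then, for every index i, sums a fresh slice of the doubled gap list; B makes one pass over zip(phase_list, phase_time_list) keeping a running prefix sum, appending each start time as it goes.
import Mathlib
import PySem

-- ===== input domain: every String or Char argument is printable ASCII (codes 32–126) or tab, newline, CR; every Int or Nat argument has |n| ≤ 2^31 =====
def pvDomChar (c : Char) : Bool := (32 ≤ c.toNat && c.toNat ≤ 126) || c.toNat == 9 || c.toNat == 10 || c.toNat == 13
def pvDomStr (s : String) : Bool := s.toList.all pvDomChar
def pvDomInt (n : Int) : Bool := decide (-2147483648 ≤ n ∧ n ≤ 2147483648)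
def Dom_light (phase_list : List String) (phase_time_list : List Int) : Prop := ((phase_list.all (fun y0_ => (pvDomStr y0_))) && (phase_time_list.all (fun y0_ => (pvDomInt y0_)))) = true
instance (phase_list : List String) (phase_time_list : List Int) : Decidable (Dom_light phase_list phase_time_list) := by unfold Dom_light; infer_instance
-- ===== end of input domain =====

-- B replaces A's per-index "sum of a slice of the doubled gap list" by a single pass with a
-- running prefix sum (objective: faster).

-- ===== PORT A =====
-- body of A's first loop: append phase i, yellow i; append time i, 3
def lightStep1 (phase_list yellow_list : List String) (phase_time_list : List Int)
    (st : List String × List Int) (i : Int) : List String × List Int :=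
  let light_list := st.1 ++ [PySem.List.pyGetD phase_list i ""]
  let light_list := light_list ++ [PySem.List.pyGetD yellow_list i ""]
  let time_gap_list := st.2 ++ [PySem.List.pyGetD phase_time_list i 0]
  let time_gap_list := time_gap_list ++ [3]
  (light_list, time_gap_list)

-- body of A's second loop: x = (2*time_gap_list)[:i+1]; append sum(x)
def lightStep2 (time_gap_list : List Int) (time_list : List Int) (i : Int) : List Int :=
  let x := PySem.List.slice (time_gap_list ++ time_gap_list) none (some (i + 1))
  time_list ++ [x.sum]

def light (phase_list : List String) (phase_time_list : List Int) : List String × List Int :=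
  let yellow_list := phase_list.map (fun x => PySem.Str.replace x "G" "y")
  let st := (PySem.List.pyRange 0 (yellow_list.length : Int) 1).foldl
    (lightStep1 phase_list yellow_list phase_time_list) ([], [0])
  let time_list := (PySem.List.pyRange 0 (st.2.length : Int) 1).foldl (lightStep2 st.2) []
  (st.1, time_list)

-- ===== PORT B =====
-- body of B's single loop: append phase and its yellow, add t then 3 to the running sum, record both
def lightAltStep (st : List String × List Int × Int) (pt : String × Int) :
    List String × List Int × Int :=
  let light_list := st.1 ++ [pt.1]
  let light_list := light_list ++ [PySem.Str.replace pt.1 "G" "y"]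
  let acc := st.2.2 + pt.2
  let time_list := st.2.1 ++ [acc]
  let acc := acc + 3
  let time_list := time_list ++ [acc]
  (light_list, time_list, acc)

def light_alt (phase_list : List String) (phase_time_list : List Int) : List String × List Int :=
  let st := (phase_list.zip phase_time_list).foldl lightAltStep ([], [0], 0)
  (st.1, st.2.1)

-- ===== PRECONDITION & SPEC =====
-- A indexes phase_time_list[i] for every i < len(phase_list), so it raises IndexError exactly when
-- phase_time_list is shorter than phase_list; Pre_ excludes those inputs.
def Pre_light (phase_list : List String) (phase_time_list : List Int) : Prop :=
  phase_list.length ≤ phase_time_list.length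
instance (phase_list : List String) (phase_time_list : List Int) : Decidable (Pre_light phase_list phase_time_list) := by unfold Pre_light; infer_instance
def pvWitness_light : List String × List Int := (["GrG", "rGr"], [10, 20])

def Spec_light (phase_list : List String) (phase_time_list : List Int) (out : List String × List Int) : Prop := out = light_alt phase_list phase_time_list
instance (phase_list : List String) (phase_time_list : List Int) (out : List String × List Int) : Decidable (Spec_light phase_list phase_time_list out) := by unfold Spec_light; infer_instance

-- ===== CLAIM (what is proved, stated in full; the proofs are below) =====
def Claim_equal_light : Prop := ∀ (phase_list : List String) (phase_time_list : List Int), Dom_light phase_list phase_time_list → Pre_light phase_list phase_time_list → Spec_light phase_list phase_time_list (light phase_list phase_time_list)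

-- ===== LEMMAS AND PROOFS =====

-- the yellow phase string
def rep (p : String) : String := PySem.Str.replace p "G" "y"
-- the gap list A builds (without its leading 0): each phase time followed by 3
def gapsL (ts : List Int) : List Int := ts.flatMap (fun t => [t, 3])
-- inclusive prefix sums starting from a
def psumFrom (a : Int) : List Int → List Int
  | [] => []
  | g :: G => (a + g) :: psumFrom (a + g) G

theorem map_range_take_sum (G : List Int) (a : Int) :
    (List.range G.length).map (fun k => a + (G.take (k + 1)).sum) = psumFrom a G := by
  induction G generalizing a with
  | nil => simp [psumFrom]
  | cons g G ih =>
    simp only [List.length_cons, List.range_succ_eq_map, List.map_cons, List.map_map, psumFrom]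
    congr 1
    · simp
    · rw [← ih (a + g)]
      apply List.map_congr_left
      intro k hk
      simp [Function.comp, List.take_succ_cons]
      ring

theorem map_snd_zip_take {α β : Type} (l1 : List α) (l2 : List β)
    (h : l1.length ≤ l2.length) : (l1.zip l2).map Prod.snd = l2.take l1.length := by
  induction l1 generalizing l2 with
  | nil => simp
  | cons x l1 ih =>
    cases l2 with
    | nil => simp at h
    | cons y l2 => simp_all

theorem loop1_char (pl : List String) (tl : List Int) (k : Nat)
    (hk : k ≤ pl.length) (hk2 : k ≤ tl.length) :
    (PySem.List.pyRange 0 (k : Int) 1).foldl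
        (lightStep1 pl (pl.map (fun x => PySem.Str.replace x "G" "y")) tl) ([], [0])
      = ((pl.take k).flatMap (fun p => [p, rep p]), 0 :: gapsL (tl.take k)) := by
  induction k with
  | zero =>
    rw [Nat.cast_zero, PySem.List.pyRange_one_eq_nil le_rfl]
    rfl
  | succ k ih =>
    rw [show ((k + 1 : Nat) : Int) = (k : Int) + 1 by push_cast; ring,
        PySem.List.pyRange_one_succ_right (by positivity), List.foldl_append,
        ih (by omega) (by omega)]
    have hkp : k < pl.length := by omega
    have hkt : k < tl.length := by omega
    simp only [List.foldl_cons, List.foldl_nil, lightStep1, PySem.List.pyGetD_natCast]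
    have h1 : pl.take (k + 1) = pl.take k ++ [pl[k]] := by
      rw [List.take_add_one, List.getElem?_eq_getElem hkp]; rfl
    have h2 : tl.take (k + 1) = tl.take k ++ [tl[k]] := by
      rw [List.take_add_one, List.getElem?_eq_getElem hkt]; rfl
    rw [h1, h2]
    simp only [List.flatMap_append, List.flatMap_cons, List.flatMap_nil, List.append_nil,
      gapsL, rep, Prod.mk.injEq, List.append_assoc, List.cons_append,
      List.nil_append]
    constructor
    · simp [List.getD_eq_getElem?_getD, hkp]
    · simp [List.getD_eq_getElem?_getD, hkt]

theorem loop2_char (G : List Int) :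
    (PySem.List.pyRange 0 (G.length : Int) 1).foldl (lightStep2 G) [] = psumFrom 0 G := by
  have h1 : ∀ tlst, (PySem.List.pyRange 0 (G.length : Int) 1).foldl (lightStep2 G) tlst
      = tlst ++ (PySem.List.pyRange 0 (G.length : Int) 1).map
          (fun i => (PySem.List.slice (G ++ G) none (some (i + 1))).sum) :=
    fun tlst => PySem.List.foldl_append_singleton_eq_map _ _ tlst
  rw [h1, List.nil_append, PySem.List.pyRange_zero_nat, List.map_map]
  rw [← map_range_take_sum G 0]
  apply List.map_congr_left
  intro k hk
  simp only [List.mem_range] at hk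
  simp only [Function.comp]
  rw [show ((k : Int) + 1) = ((k + 1 : Nat) : Int) by push_cast; ring,
      PySem.List.slice_to_natCast, List.take_append_of_le_length (by omega)]
  simp

theorem loopB_char (l : List (String × Int)) (L : List String) (T : List Int) (a : Int) :
    l.foldl lightAltStep (L, T, a)
      = (L ++ l.flatMap (fun pt => [pt.1, rep pt.1]),
         T ++ psumFrom a (gapsL (l.map Prod.snd)),
         a + (l.map Prod.snd).sum + 3 * l.length) := by
  induction l generalizing L T a with
  | nil => simp [gapsL, psumFrom]
  | cons pt l ih =>
    simp only [List.foldl_cons, lightAltStep, ih, List.map_cons, List.length_cons]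
    simp only [Prod.mk.injEq]
    refine ⟨by simp [rep], ?_, by simp only [List.sum_cons]; push_cast; ring⟩
    simp [gapsL, psumFrom]

-- ===== VERDICT (by name: the statement is the Claim_ definition above) =====
theorem light_spec : Claim_equal_light := by
  intro pl tl _ hpre
  unfold Spec_light light light_alt
  simp only [List.length_map]
  rw [loop1_char pl tl pl.length le_rfl hpre]
  rw [loopB_char, map_snd_zip_take pl tl hpre]
  have hfst : (pl.zip tl).flatMap (fun pt => [pt.1, rep pt.1])
      = pl.flatMap (fun p => [p, rep p]) := by
    have := List.map_fst_zip hpre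
    calc (pl.zip tl).flatMap (fun pt => [pt.1, rep pt.1])
        = ((pl.zip tl).map Prod.fst).flatMap (fun p => [p, rep p]) := by
          rw [List.flatMap_map]
      _ = pl.flatMap (fun p => [p, rep p]) := by rw [this]
  rw [hfst, loop2_char, List.take_length]
  simp [psumFrom]
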